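-- pv_equiv track=rewrite | github.com/apostolovbg/devcovenant | devcovenant/core/policies/changelog_coverage/fixers/global.py | _wrap_single_path
-- ===== SOURCE A (Python) =====
-- from typing import Iterable, List, Tuple
--
-- def _wrap_single_path(path: str, max_len: int) -> List[str]:
--     """Wrap a single file path into one or more lines."""
--     indent = "  "
--     continuation = "    "
--     remaining = path
--     output: List[str] = []
--     # Bound iterations to guarantee forward progress even on malformed input.
--     for _ in range(max(len(path), 1)):
--         current = f"{indent}{remaining}"
--         if len(current) <= max_len or "/" not in remaining:
--             output.append(current)
--             return output
--         available = max_len - len(indent) - 1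
--         break_at = remaining.rfind("/", 0, max(available, 1))
--         if break_at <= 0:
--             output.append(current)
--             return output
--         head = remaining[: break_at + 1]
--         tail = remaining[break_at + 1 :]
--         output.append(f"{indent}{head}\\")
--         remaining = tail
--         indent = continuation
--     output.append(f"{indent}{remaining}")
--     return output
-- ===== SOURCE B (Python) =====
-- from typing import List
--
--
-- def _split_keep_slash(path: str) -> List[str]:
--     """Split a path into segments, each keeping its trailing '/'; the last
--     segment (possibly empty) holds the slash-free remainder."""
--     segs: List[str] = []
--     cur = ""
--     for ch in path:
--         cur += ch
--         if ch == "/":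
--             segs.append(cur)
--             cur = ""
--     segs.append(cur)
--     return segs
--
--
-- def _emit(segs: List[str], max_len: int, first: bool) -> List[str]:
--     indent = "  " if first else "    "
--     rest = "".join(segs)
--     if len(indent) + len(rest) <= max_len or len(segs) <= 1:
--         return [indent + rest]
--     budget = max(max_len - len(indent) - 1, 1)
--     c, j = 0, 0
--     while j < len(segs) - 1 and c + len(segs[j]) <= budget:
--         c += len(segs[j])
--         j += 1
--     if c <= 1:
--         return [indent + rest]
--     return [indent + "".join(segs[:j]) + "\\"] + _emit(segs[j:], max_len, False)
--
--
-- def _wrap_single_path(path: str, max_len: int) -> List[str]: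
--     """Wrap a single file path into one or more lines."""
--     return _emit(_split_keep_slash(path), max_len, True)
-- ===== Notes on version B (the rewrite author's own statement) =====
-- stated objective: alternative
-- what changed: B splits the path once into '/'-terminated segments and then greedily packs whole segments onto each line in a single forward pass, instead of A's loop that repeatedly rebuilds the remaining string and rfind-scans a character window backwards for a break point.
import Mathlib
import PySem

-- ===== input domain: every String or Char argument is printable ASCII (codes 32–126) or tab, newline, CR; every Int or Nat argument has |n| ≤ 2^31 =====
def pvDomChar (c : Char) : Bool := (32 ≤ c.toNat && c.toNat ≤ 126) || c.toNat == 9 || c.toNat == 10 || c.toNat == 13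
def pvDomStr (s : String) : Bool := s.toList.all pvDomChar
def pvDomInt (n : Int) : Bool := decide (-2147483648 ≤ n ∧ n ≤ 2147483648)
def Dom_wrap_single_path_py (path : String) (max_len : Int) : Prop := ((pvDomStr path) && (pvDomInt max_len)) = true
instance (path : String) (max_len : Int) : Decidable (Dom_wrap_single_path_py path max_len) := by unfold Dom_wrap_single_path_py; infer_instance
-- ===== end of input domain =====

-- B replaces A's repeated rfind-and-reslice loop by splitting the path once into
-- '/'-terminated segments and greedily packing whole segments onto each line (objective: alternative).

-- ===== PORT A =====
-- Hand port of Python's remaining.rfind("/", 0, e): the largest index p < e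
-- holding '/', or -1 if none (every call site has e ≥ 1, window start 0); exact there.
def rfindSlash (l : List Char) (e : Int) : Int :=
  match l with
  | [] => -1
  | c :: rest =>
    if e ≤ 0 then -1
    else
      let r := rfindSlash rest (e - 1)
      if 0 ≤ r then r + 1 else if c = '/' then 0 else -1

-- A's bounded for-loop with its early returns; fuel = the range bound max(len(path),1);
-- the fuel-0 arm is the post-loop `output.append(f"{indent}{remaining}")`.
def loopA (max_len : Int) : Nat → List Char → List Char → List (List Char) → List (List Char)
  | 0, indent, remaining, output => output ++ [indent ++ remaining]
  | fuel + 1, indent, remaining, output =>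
    let current := indent ++ remaining
    if (current.length : Int) ≤ max_len ∨ '/' ∉ remaining then output ++ [current]
    else
      let available := max_len - (indent.length : Int) - 1
      let break_at := rfindSlash remaining (max available 1)
      if break_at ≤ 0 then output ++ [current]
      else
        -- remaining[: break_at+1] and remaining[break_at+1 :] with 0 < break_at: exact
        let head := remaining.take (break_at + 1).toNat
        let tail := remaining.drop (break_at + 1).toNat
        loopA max_len fuel [' ', ' ', ' ', ' '] tail (output ++ [indent ++ head ++ ['\\']])

def wrap_single_path_py (path : String) (max_len : Int) : List String :=
  (loopA max_len (max path.toList.length 1) [' ', ' '] path.toList []).map String.ofList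

-- ===== PORT B =====
def splitStep (st : List (List Char) × List Char) (ch : Char) : List (List Char) × List Char :=
  let cur := st.2 ++ [ch]
  if ch = '/' then (st.1 ++ [cur], []) else (st.1, cur)

-- _split_keep_slash: segments each keeping their trailing '/', plus the (possibly empty) tail
def splitKeep (l : List Char) : List (List Char) :=
  let p := l.foldl splitStep ([], [])
  p.1 ++ [p.2]

-- Source B's inner while loop: (j, c) = (#segments packed, their total length)
def greedy : List (List Char) → Int → Int → Nat × Int
  | [], _, c => (0, c)
  | [_], _, c => (0, c)
  | s :: t :: rest, budget, c =>
    if c + (s.length : Int) ≤ budget then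
      let p := greedy (t :: rest) budget (c + (s.length : Int))
      (p.1 + 1, p.2)
    else (0, c)

-- these two are needed by emitB's termination proof
theorem greedy_j0 (segs : List (List Char)) (b c : Int) :
    (greedy segs b c).1 = 0 → (greedy segs b c).2 = c := by
  match segs with
  | [] => intro _; rfl
  | [_] => intro _; rfl
  | s :: t :: rest =>
    unfold greedy
    split
    · intro h; simp at h
    · intro _; rfl

theorem drop_greedy_lt (segs : List (List Char)) (b : Int)
    (h2 : ¬ (greedy segs b 0).2 ≤ 1) (hlen : ¬ segs.length ≤ 1) :
    (segs.drop (greedy segs b 0).1).length < segs.length := by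
  have hj : (greedy segs b 0).1 ≠ 0 := by
    intro h0
    rw [greedy_j0 _ _ _ h0] at h2
    omega
  simp only [List.length_drop]
  omega

-- _emit
def emitB (max_len : Int) (segs : List (List Char)) (first : Bool) : List (List Char) :=
  let indent := if first then [' ', ' '] else [' ', ' ', ' ', ' ']
  let rest := segs.flatten
  if h1 : (indent.length : Int) + (rest.length : Int) ≤ max_len ∨ segs.length ≤ 1 then
    [indent ++ rest]
  else
    let jc := greedy segs (max (max_len - (indent.length : Int) - 1) 1) 0
    if h2 : jc.2 ≤ 1 then [indent ++ rest]
    else (indent ++ (segs.take jc.1).flatten ++ ['\\']) :: emitB max_len (segs.drop jc.1) false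
termination_by segs.length
decreasing_by
  exact drop_greedy_lt _ _ h2 (fun h => h1 (Or.inr h))

def wrap_single_path_py_alt (path : String) (max_len : Int) : List String :=
  (emitB max_len (splitKeep path.toList) true).map String.ofList

-- ===== PRECONDITION & SPEC =====
def Spec_wrap_single_path_py (path : String) (max_len : Int) (out : List String) : Prop := out = wrap_single_path_py_alt path max_len
instance (path : String) (max_len : Int) (out : List String) : Decidable (Spec_wrap_single_path_py path max_len out) := by unfold Spec_wrap_single_path_py; infer_instance

-- ===== CLAIM (what is proved, stated in full; the proofs are below) =====
def Claim_equal_wrap_single_path_py : Prop := ∀ (path : String) (max_len : Int), Dom_wrap_single_path_py path max_len → Spec_wrap_single_path_py path max_len (wrap_single_path_py path max_len)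

-- ===== LEMMAS AND PROOFS =====

def IsSeg (s : List Char) : Prop := ∃ u, s = u ++ ['/'] ∧ '/' ∉ u

def ValidSegs : List (List Char) → Prop
  | [] => True
  | [s] => '/' ∉ s
  | s :: t :: rest => IsSeg s ∧ ValidSegs (t :: rest)

theorem rfind_ge (l : List Char) : ∀ e : Int, -1 ≤ rfindSlash l e := by
  induction l with
  | nil => intro e; simp [rfindSlash]
  | cons c rest ih =>
    intro e
    simp only [rfindSlash]
    split
    · omega
    · have := ih (e - 1)
      split
      · omega
      · split <;> omega

theorem rfind_nonpos (l : List Char) : ∀ e : Int, e ≤ 0 → rfindSlash l e = -1 := by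
  cases l <;> intro e he <;> simp [rfindSlash, he]

theorem rfind_noslash (l : List Char) : ∀ e : Int, '/' ∉ l → rfindSlash l e = -1 := by
  induction l with
  | nil => intro e _; simp [rfindSlash]
  | cons c rest ih =>
    intro e h
    have hc : ¬ (c = '/') := by intro hc; exact h (by simp [hc])
    have hr : '/' ∉ rest := by intro hr; exact h (by simp [hr])
    simp only [rfindSlash]
    split
    · rfl
    · rw [ih _ hr]; simp

theorem rfind_prefix (u : List Char) : ∀ (t : List Char) (e : Int), '/' ∉ u → e ≤ (u.length : Int) →
    rfindSlash (u ++ t) e = -1 := by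
  induction u with
  | nil => intro t e _ he; exact rfind_nonpos _ _ (by simpa using he)
  | cons a u' ih =>
    intro t e h he
    have ha : ¬ (a = '/') := by intro hc; exact h (by simp [hc])
    have hu : '/' ∉ u' := by intro hr; exact h (by simp [hr])
    simp only [List.cons_append, rfindSlash]
    split
    · rfl
    · rw [ih t (e - 1) hu (by simp at he; omega)]
      simp

theorem rfind_seg (u : List Char) : ∀ (t : List Char) (e : Int), '/' ∉ u → (u.length : Int) + 1 ≤ e →
    rfindSlash ((u ++ ['/']) ++ t) e = ((u.length : Int) + 1) + rfindSlash t (e - ((u.length : Int) + 1)) := by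
  induction u with
  | nil =>
    intro t e _ he
    simp only [List.nil_append, List.cons_append, rfindSlash]
    rw [if_neg (by omega)]
    have hge := rfind_ge t (e - 1)
    by_cases h0 : 0 ≤ rfindSlash t (e - 1)
    · rw [if_pos h0]; simp; omega
    · rw [if_neg h0]
      have h1 : rfindSlash t (e - 1) = -1 := by omega
      simp [h1]
  | cons a u' ih =>
    intro t e h he
    have ha : ¬ (a = '/') := by intro hc; exact h (by simp [hc])
    have hu : '/' ∉ u' := by intro hr; exact h (by simp [hr])
    simp only [List.cons_append, rfindSlash]
    rw [if_neg (by simp at he; omega)]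
    rw [ih t (e - 1) hu (by simp at he; omega)]
    have hge := rfind_ge t (e - 1 - ((u'.length : Int) + 1))
    rw [if_pos (by omega)]
    have harg : e - 1 - ((u'.length : Int) + 1) = e - (((a :: u').length : Int) + 1) := by
      push_cast [List.length_cons]; ring
    rw [harg]
    push_cast [List.length_cons]
    ring

theorem greedy_sum (segs : List (List Char)) : ∀ b c : Int,
    (greedy segs b c).2 = c + (((segs.take (greedy segs b c).1).flatten.length : Int)) := by
  match segs with
  | [] => intro b c; simp [greedy]
  | [s] => intro b c; simp [greedy]
  | s :: t :: rest =>
    intro b c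
    unfold greedy
    split
    · have ih := greedy_sum (t :: rest) b (c + (s.length : Int))
      simp only []
      rw [ih]
      simp [List.take_succ_cons]
      ring_nf
    · simp

theorem rfind_greedy (segs : List (List Char)) : ∀ b c : Int, ValidSegs segs → 0 ≤ c → c ≤ b →
    (greedy segs b c).2 = c + rfindSlash segs.flatten (b - c) + 1 := by
  match segs with
  | [] =>
    intro b c _ _ _
    simp [greedy, rfindSlash]
  | [s] =>
    intro b c hv _ _
    have hns : '/' ∉ s := hv
    have h := rfind_noslash (s ++ []) (b - c) (by simpa using hns)
    simp only [greedy, List.flatten_cons, List.flatten_nil, h]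
    omega
  | s :: t :: rest =>
    intro b c hv hc hcb
    obtain ⟨⟨u, hs, hu⟩, hv'⟩ := hv
    have hm : (s.length : Int) = (u.length : Int) + 1 := by
      rw [hs]; push_cast [List.length_append, List.length_cons, List.length_nil]; ring
    unfold greedy
    split
    · rename_i hfit
      have ih := rfind_greedy (t :: rest) b (c + (s.length : Int)) hv' (by omega) hfit
      simp only []
      rw [ih]
      have hflat : (s :: t :: rest).flatten = (u ++ ['/']) ++ (t :: rest).flatten := by
        rw [List.flatten_cons, hs]
      rw [hflat, rfind_seg u _ (b - c) hu (by omega)]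
      have harg : b - (c + (s.length : Int)) = b - c - ((u.length : Int) + 1) := by omega
      rw [harg]
      omega
    · rename_i hfit
      simp only []
      have hflat : (s :: t :: rest).flatten = u ++ ('/' :: (t :: rest).flatten) := by
        rw [List.flatten_cons, hs]; simp
      rw [hflat, rfind_prefix u _ (b - c) hu (by omega)]
      simp

theorem slash_iff (segs : List (List Char)) (hv : ValidSegs segs) :
    ('/' ∈ segs.flatten ↔ 2 ≤ segs.length) := by
  match segs with
  | [] => simp
  | [s] =>
    have hns : '/' ∉ s := hv
    simp [hns]
  | s :: t :: rest =>
    obtain ⟨⟨u, hs, _⟩, _⟩ := hv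
    constructor
    · intro _; simp
    · intro _
      rw [List.flatten_cons, hs]
      simp

theorem valid_drop (segs : List (List Char)) : ∀ j, ValidSegs segs → ValidSegs (segs.drop j) := by
  induction segs with
  | nil => intro j _; simp [ValidSegs]
  | cons s rest ih =>
    intro j hv
    cases j with
    | zero => exact hv
    | succ j' =>
      simp only [List.drop_succ_cons]
      apply ih
      match rest, hv with
      | [], _ => trivial
      | t :: r, hv => exact hv.2

theorem splitKeep_inv (l : List Char) : ∀ (segs : List (List Char)) (cur : List Char),
    (∀ s ∈ segs, IsSeg s) → '/' ∉ cur →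
    (∀ s ∈ (l.foldl splitStep (segs, cur)).1, IsSeg s) ∧ '/' ∉ (l.foldl splitStep (segs, cur)).2 ∧
      (l.foldl splitStep (segs, cur)).1.flatten ++ (l.foldl splitStep (segs, cur)).2 = segs.flatten ++ cur ++ l := by
  induction l with
  | nil => intro segs cur h1 h2; simpa using ⟨h1, h2⟩
  | cons ch l' ih =>
    intro segs cur h1 h2
    by_cases hch : ch = '/'
    · have hstep : splitStep (segs, cur) ch = (segs ++ [cur ++ [ch]], []) := by
        simp [splitStep, hch]
      have h1' : ∀ s ∈ segs ++ [cur ++ [ch]], IsSeg s := by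
        intro s hsmem
        rcases List.mem_append.1 hsmem with h | h
        · exact h1 s h
        · simp at h
          exact ⟨cur, by rw [h, hch], h2⟩
      have hrec := ih (segs ++ [cur ++ [ch]]) [] h1' (by simp)
      simp only [List.foldl_cons, hstep]
      refine ⟨hrec.1, hrec.2.1, ?_⟩
      rw [hrec.2.2]
      simp [hch]
    · have hstep : splitStep (segs, cur) ch = (segs, cur ++ [ch]) := by
        simp [splitStep, hch]
      have h2' : '/' ∉ cur ++ [ch] := by
        intro hmem
        rcases List.mem_append.1 hmem with h | h
        · exact h2 h
        · simp at h; exact hch h.symm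
      have hrec := ih segs (cur ++ [ch]) h1 h2'
      simp only [List.foldl_cons, hstep]
      refine ⟨hrec.1, hrec.2.1, ?_⟩
      rw [hrec.2.2]
      simp

theorem valid_append_last (A : List (List Char)) : ∀ b : List Char, (∀ s ∈ A, IsSeg s) → '/' ∉ b →
    ValidSegs (A ++ [b]) := by
  induction A with
  | nil => intro b _ h2; exact h2
  | cons a A' ih =>
    intro b h1 h2
    have hA' := ih b (fun s hs => h1 s (by simp [hs])) h2
    match A' with
    | [] => exact ⟨h1 a (by simp), hA'⟩
    | t :: r => exact ⟨h1 a (by simp), hA'⟩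

theorem splitKeep_valid (l : List Char) : ValidSegs (splitKeep l) := by
  have h := splitKeep_inv l [] [] (by simp) (by simp)
  exact valid_append_last _ _ h.1 h.2.1

theorem splitKeep_flatten (l : List Char) : (splitKeep l).flatten = l := by
  have h := splitKeep_inv l [] [] (by simp) (by simp)
  unfold splitKeep
  simpa using h.2.2

theorem main_lemma (ml : Int) : ∀ (fuel : Nat) (segs : List (List Char)) (first : Bool) (out : List (List Char)),
    ValidSegs segs → segs.flatten.length ≤ 2 * fuel →
    loopA ml fuel (if first then [' ', ' '] else [' ', ' ', ' ', ' ']) segs.flatten out = out ++ emitB ml segs first := by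
  intro fuel
  induction fuel with
  | zero =>
    intro segs first out hv hlen
    have hflat : segs.flatten = [] := List.eq_nil_of_length_eq_zero (by omega)
    have hle : segs.length ≤ 1 := by
      by_contra h
      have hmem := (slash_iff segs hv).2 (by omega)
      rw [hflat] at hmem; simp at hmem
    unfold loopA emitB
    rw [hflat, dif_pos (Or.inr hle)]
  | succ fuel ih =>
    intro segs first out hv hlen
    set ind := (if first then [' ', ' '] else [' ', ' ', ' ', ' ']) with hind
    by_cases h1 : ((ind ++ segs.flatten).length : Int) ≤ ml ∨ '/' ∉ segs.flatten
    · have h1' : ((ind.length : Int) + (segs.flatten.length : Int) ≤ ml ∨ segs.length ≤ 1) := by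
        rcases h1 with h | h
        · left; rw [List.length_append] at h; push_cast at h ⊢; omega
        · right
          by_contra hh
          exact h ((slash_iff segs hv).2 (by omega))
      unfold loopA emitB
      rw [if_pos h1, dif_pos h1']
    · have h1a : ¬ ((ind ++ segs.flatten).length : Int) ≤ ml := fun h => h1 (Or.inl h)
      have h1b : '/' ∈ segs.flatten := by
        by_contra h; exact h1 (Or.inr h)
      have hlen2 : 2 ≤ segs.length := (slash_iff segs hv).1 h1b
      have h1' : ¬ ((ind.length : Int) + (segs.flatten.length : Int) ≤ ml ∨ segs.length ≤ 1) := by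
        intro h
        rcases h with h | h
        · exact h1a (by rw [List.length_append]; push_cast; omega)
        · omega
      have hb1 : (1 : Int) ≤ max (ml - (ind.length : Int) - 1) 1 := le_max_right _ _
      have hrg : (greedy segs (max (ml - (ind.length : Int) - 1) 1) 0).2
          = rfindSlash segs.flatten (max (ml - (ind.length : Int) - 1) 1) + 1 := by
        have h := rfind_greedy segs (max (ml - (ind.length : Int) - 1) 1) 0 hv le_rfl (by omega)
        simpa using h
      unfold loopA
      rw [if_neg h1]
      by_cases h2 : (greedy segs (max (ml - (ind.length : Int) - 1) 1) 0).2 ≤ 1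
      · rw [if_pos (by omega : rfindSlash segs.flatten (max (ml - (ind.length : Int) - 1) 1) ≤ 0)]
        unfold emitB
        rw [dif_neg h1', dif_pos h2]
      · have hsum := greedy_sum segs (max (ml - (ind.length : Int) - 1) 1) 0
        set j := (greedy segs (max (ml - (ind.length : Int) - 1) 1) 0).1 with hj
        set P := (segs.take j).flatten with hP
        set S := (segs.drop j).flatten with hS
        have hPS : segs.flatten = P ++ S := by
          rw [hP, hS, ← List.flatten_append, List.take_append_drop]
        have hPlen : (greedy segs (max (ml - (ind.length : Int) - 1) 1) 0).2 = (P.length : Int) := by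
          rw [hsum]; omega
        have htn : (rfindSlash segs.flatten (max (ml - (ind.length : Int) - 1) 1) + 1).toNat = P.length := by
          omega
        rw [if_neg (by omega : ¬ rfindSlash segs.flatten (max (ml - (ind.length : Int) - 1) 1) ≤ 0)]
        have hhead : segs.flatten.take (rfindSlash segs.flatten (max (ml - (ind.length : Int) - 1) 1) + 1).toNat = P := by
          rw [htn, hPS, List.take_left]
        have htail : segs.flatten.drop (rfindSlash segs.flatten (max (ml - (ind.length : Int) - 1) 1) + 1).toNat = S := by
          rw [htn, hPS, List.drop_left]
        rw [hhead, htail]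
        have hlenS : S.length ≤ 2 * fuel := by
          have hl : segs.flatten.length = P.length + S.length := by rw [hPS]; simp
          have hP2 : (2 : Int) ≤ (P.length : Int) := by omega
          omega
        have ihc := ih (segs.drop j) false (out ++ [ind ++ P ++ ['\\']]) (valid_drop segs j hv) hlenS
        simp only [if_neg (Bool.false_ne_true)] at ihc
        rw [← hS] at ihc
        unfold emitB
        rw [← hind, dif_neg h1', dif_neg h2, ← hj, ← hP]
        rw [ihc]
        simp only [List.append_assoc, List.singleton_append]

-- ===== VERDICT (by name: the statement is the Claim_ definition above) =====
theorem wrap_single_path_py_spec : Claim_equal_wrap_single_path_py := by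
  intro path max_len _
  unfold Spec_wrap_single_path_py wrap_single_path_py wrap_single_path_py_alt
  have h := main_lemma max_len (max path.toList.length 1) (splitKeep path.toList) true []
    (splitKeep_valid _) (by rw [splitKeep_flatten]; omega)
  rw [splitKeep_flatten] at h
  simp only [reduceIte] at h
  rw [h]
  simp
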